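-- pv_equiv track=rewrite | github.com/olus2000/BPU | compiler.py | logisim_compiler
-- ===== SOURCE A (Python) =====
-- def logisim_compiler(b):
--     out = 'v2.0 raw\n'
--     x = b[0]
--     n = 0
--     for c in b:
--         if c == x:
--             n += 1
--         else:
--             if n > 1:
--                 out += str(n) + '*'
--             out += hex(x)[2:] + ' '
--             x = c
--             n = 1
--     if x > 0:
--         if n > 1:
--             out += str(n) + '*'
--         out += hex(x)[2:] + ' '
--     return out
-- ===== SOURCE B (Python) =====
-- def logisim_compiler(b):
--     runs = []
--     for c in b:
--         if runs and runs[-1][0] == c: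
--             runs[-1][1] += 1
--         else:
--             runs.append([c, 1])
--     if runs and runs[-1][0] <= 0:
--         runs.pop()
--     parts = [(str(n) + '*' if n > 1 else '') + hex(v)[2:] + ' ' for v, n in runs]
--     return 'v2.0 raw\n' + ''.join(parts)
-- ===== Notes on version B (the rewrite author's own statement) =====
-- stated objective: simpler
-- what changed: A interleaves run-detection, string emission and end-of-run bookkeeping in one stateful loop with a trailing flush; B first builds the run-length list (value,count), drops a trailing nonpositive run, then renders each run with a comprehension and one join.
-- crash fix: On the empty list A raises IndexError at b[0]; B returns the bare header 'v2.0 raw\n'. — e.g. on logisim_compiler([]): A raises IndexError, B returns "v2.0 raw\n"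
import Mathlib
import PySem

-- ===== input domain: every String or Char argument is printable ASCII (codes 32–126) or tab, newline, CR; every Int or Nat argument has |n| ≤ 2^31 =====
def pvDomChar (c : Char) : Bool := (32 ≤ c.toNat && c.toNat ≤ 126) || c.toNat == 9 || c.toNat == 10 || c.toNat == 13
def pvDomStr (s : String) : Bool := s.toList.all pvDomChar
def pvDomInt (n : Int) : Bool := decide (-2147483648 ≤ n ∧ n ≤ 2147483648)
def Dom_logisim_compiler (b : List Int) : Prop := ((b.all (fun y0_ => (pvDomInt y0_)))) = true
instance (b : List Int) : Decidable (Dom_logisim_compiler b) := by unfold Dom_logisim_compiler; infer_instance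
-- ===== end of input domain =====

-- B replaces A's interleaved state machine by two phases — build the run list, then render it —
-- which is a plainer decomposition (objective: simpler); same O(n) cost.
-- A raises IndexError on [] (excluded by Pre_); B naturally returns the bare header there (Raises_ block).

-- hex(x)[2:] : for x ≥ 0 the lowercase hex digits, for x < 0 ('-0x…'[2:]) the string "x" ++ digits of |x|.
-- Exact port of Python's hex()[2:] on all Int (Nat.toDigits 16 gives lowercase hex digits, "0" for 0).
def pyHexTail (x : Int) : String :=
  if x < 0 then "x" ++ String.ofList (Nat.toDigits 16 (-x).toNat)
  else String.ofList (Nat.toDigits 16 x.toNat)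

-- ===== PORT A =====
-- loop body of A: state (out, x, n)
def aStep (s : String × Int × Int) (c : Int) : String × Int × Int :=
  if c == s.2.1 then (s.1, s.2.1, s.2.2 + 1)
  else
    ((if s.2.2 > 1 then s.1 ++ PySem.Int.toStr s.2.2 ++ "*" else s.1) ++ pyHexTail s.2.1 ++ " ",
     c, 1)

def logisim_compiler (b : List Int) : String :=
  match PySem.List.pyGet? b 0 with
  | none => ""   -- b[0] raises IndexError; excluded by Pre_
  | some x0 =>
    let s := b.foldl aStep ("v2.0 raw\n", x0, 0)
    if s.2.1 > 0 then
      (if s.2.2 > 1 then s.1 ++ PySem.Int.toStr s.2.2 ++ "*" else s.1) ++ pyHexTail s.2.1 ++ " "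
    else s.1

-- ===== PORT B =====
-- B keeps `runs` with append/inspect-last; ported as a reversed accumulator (head = last run).
def bStep (rs : List (Int × Int)) (c : Int) : List (Int × Int) :=
  match rs with
  | (v, n) :: rest => if v == c then (v, n + 1) :: rest else (c, 1) :: rs
  | [] => [(c, 1)]

-- one element of the `parts` comprehension
def bPart (p : Int × Int) : String :=
  (if p.2 > 1 then PySem.Int.toStr p.2 ++ "*" else "") ++ pyHexTail p.1 ++ " "

def logisim_compiler_alt (b : List Int) : String :=
  let runsRev := b.foldl bStep []
  let runsRev := match runsRev with
    | (v, _) :: rest => if v ≤ 0 then rest else runsRev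
    | [] => []
  "v2.0 raw\n" ++ String.join (runsRev.reverse.map bPart)

-- ===== PRECONDITION & SPEC =====
-- A evaluates b[0]: it raises IndexError exactly on the empty list.
def Pre_logisim_compiler (b : List Int) : Prop := b ≠ []
instance (b : List Int) : Decidable (Pre_logisim_compiler b) := by unfold Pre_logisim_compiler; infer_instance
def pvWitness_logisim_compiler : List Int := ([1, 1, 0, 5])

-- On the empty list A raises IndexError while B returns just the header line "v2.0 raw\n".
def Raises_logisim_compiler (b : List Int) : Prop := b = []
instance (b : List Int) : Decidable (Raises_logisim_compiler b) := by unfold Raises_logisim_compiler; infer_instance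
def pvRaiseWitness_logisim_compiler : List Int := ([])
def pvRaiseWitnessOut_logisim_compiler : String := "v2.0 raw\n"

def Spec_logisim_compiler (b : List Int) (out : String) : Prop := out = logisim_compiler_alt b
instance (b : List Int) (out : String) : Decidable (Spec_logisim_compiler b out) := by unfold Spec_logisim_compiler; infer_instance

-- ===== CLAIM =====
def Claim_equal_logisim_compiler : Prop := ∀ (b : List Int), Dom_logisim_compiler b → Pre_logisim_compiler b → Spec_logisim_compiler b (logisim_compiler b)
def Claim_raises_logisim_compiler : Prop := (∀ (b : List Int), Dom_logisim_compiler b → Raises_logisim_compiler b → ¬ Pre_logisim_compiler b) ∧ (Dom_logisim_compiler (pvRaiseWitness_logisim_compiler) ∧ Raises_logisim_compiler (pvRaiseWitness_logisim_compiler) ∧ logisim_compiler_alt (pvRaiseWitness_logisim_compiler) = pvRaiseWitnessOut_logisim_compiler)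

-- ===== LEMMAS AND PROOFS =====

-- rendering of a reversed run list
def emitRev (rs : List (Int × Int)) : String := String.join (rs.reverse.map bPart)

lemma join_snoc (l : List String) (s : String) :
    String.join (l ++ [s]) = String.join l ++ s := by
  simp [String.join]

lemma emitRev_cons (x n : Int) (rs : List (Int × Int)) :
    emitRev ((x, n) :: rs) = emitRev rs ++ bPart (x, n) := by
  simp [emitRev, join_snoc]

lemma out_step (out : String) (x n : Int) (rs : List (Int × Int))
    (h : out = "v2.0 raw\n" ++ emitRev rs) :
    (if n > 1 then out ++ PySem.Int.toStr n ++ "*" else out) ++ pyHexTail x ++ " "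
      = "v2.0 raw\n" ++ emitRev ((x, n) :: rs) := by
  subst h
  rw [emitRev_cons]
  unfold bPart
  split <;> simp [String.append_assoc]

lemma key (rest : List Int) : ∀ (x n : Int) (rs : List (Int × Int)),
    rest.foldl aStep ("v2.0 raw\n" ++ emitRev rs, x, n) =
      (match rest.foldl bStep ((x, n) :: rs) with
        | (x', n') :: rs' => ("v2.0 raw\n" ++ emitRev rs', x', n')
        | [] => ("", 0, 0)) := by
  induction rest with
  | nil => intro x n rs; rfl
  | cons c rest ih =>
    intro x n rs
    by_cases h : x = c
    · subst h
      simp only [List.foldl_cons, aStep, bStep, beq_self_eq_true, if_pos]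
      exact ih x (n + 1) rs
    · have h1 : (c == x) = false := by simp; omega
      have h2 : (x == c) = false := by simp; omega
      simp only [List.foldl_cons, aStep, bStep, h1, h2, if_neg, Bool.false_eq_true,
        not_false_iff]
      rw [out_step _ x n rs rfl]
      exact ih c 1 ((x, n) :: rs)

-- ===== VERDICT =====
theorem logisim_compiler_spec : Claim_equal_logisim_compiler := by
  intro b _ hpre
  unfold Spec_logisim_compiler
  match b with
  | [] => exact absurd rfl hpre
  | c :: rest =>
    unfold logisim_compiler logisim_compiler_alt
    have hget : PySem.List.pyGet? (c :: rest) 0 = some c := by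
      simp [PySem.List.pyGet?, PySem.List.pyIdx?]
    rw [hget]
    have hfirst : (c :: rest).foldl aStep ("v2.0 raw\n", c, 0)
        = rest.foldl aStep ("v2.0 raw\n" ++ emitRev [], c, 1) := by
      simp [aStep, emitRev, String.join]
    have hb : (c :: rest).foldl bStep [] = rest.foldl bStep ((c, 1) :: []) := by
      simp [bStep]
    simp only [hfirst, hb, key rest c 1 []]
    rcases hne : rest.foldl bStep ((c, 1) :: []) with _ | ⟨⟨x', n'⟩, rs'⟩
    · -- foldl bStep from a nonempty list is nonempty
      exfalso
      have : ∀ (l : List Int) (p : Int × Int) (rs : List (Int × Int)),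
          l.foldl bStep (p :: rs) ≠ [] := by
        intro l
        induction l with
        | nil => intro p rs h; exact List.cons_ne_nil _ _ h
        | cons a l ih =>
          intro p rs
          simp only [List.foldl_cons, bStep]
          split <;> exact ih _ _
      exact this rest (c, 1) [] hne
    · by_cases hx : x' > 0
      · have hle : ¬ x' ≤ 0 := by omega
        simp only [hx, if_pos, hle, if_neg, not_false_iff]
        rw [out_step _ x' n' rs' rfl]
        simp [emitRev]
      · have hle : x' ≤ 0 := by omega
        simp only [hx, if_neg, hle, if_pos, not_false_iff]
        simp [emitRev]

def logisim_compiler_raises : Claim_raises_logisim_compiler := by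
  unfold Claim_raises_logisim_compiler
  exact ⟨fun b _ h => by simp [Pre_logisim_compiler, Raises_logisim_compiler] at *; exact h, by decide⟩
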